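-- pv_equiv track=rewrite | github.com/wuyike2000/CoTKR | corpus/pa_filter.py | detect_repeated_text
-- ===== SOURCE A (Python) =====
-- def detect_repeated_text(text, threshold=5):
--     words = text.split()
--     word_count = {}
--
--     for word in words:
--         word_count[word] = word_count.get(word, 0) + 1
--
--     repeated_words = [word for word, count in word_count.items() if count > threshold]
--
--     if len(repeated_words)>threshold:
--         return True
--     else:
--         return False
--
--     return repeated_words
-- ===== SOURCE B (Python) =====
-- def detect_repeated_text(text, threshold=5):
--     words = sorted(text.split())
--     n = len(words)
--     repeated = 0
--     i = 0
--     while i < n: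
--         j = i + 1
--         while j < n and words[j] == words[i]:
--             j += 1
--         if j - i > threshold:
--             repeated += 1
--         i = j
--     return repeated > threshold
-- ===== Notes on version B (the rewrite author's own statement) =====
-- stated objective: alternative
-- what changed: Replaced the hash-map frequency dict and items-filter pass with sort-then-scan: sort the words, walk consecutive runs of equal words counting runs longer than the threshold, then compare that run count with the threshold.
import Mathlib
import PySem

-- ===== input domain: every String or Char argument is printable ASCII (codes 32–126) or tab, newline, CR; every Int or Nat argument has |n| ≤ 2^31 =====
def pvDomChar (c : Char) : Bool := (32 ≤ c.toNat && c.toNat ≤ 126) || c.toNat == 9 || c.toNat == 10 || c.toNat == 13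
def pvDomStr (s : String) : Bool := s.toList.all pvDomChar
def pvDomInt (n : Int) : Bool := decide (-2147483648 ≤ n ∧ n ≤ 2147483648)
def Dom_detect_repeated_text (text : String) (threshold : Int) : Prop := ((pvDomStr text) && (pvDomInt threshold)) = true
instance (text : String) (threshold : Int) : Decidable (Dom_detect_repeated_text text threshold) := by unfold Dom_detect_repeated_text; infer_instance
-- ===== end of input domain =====

-- B replaces A's dict-of-counts with sort-then-scan over runs of equal words (alternative decomposition, same result).

-- ===== PORT A =====
def detect_repeated_text (text : String) (threshold : Int) : Bool :=
  let words := PySem.Str.split₀ text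
  let word_count := words.foldl (fun d w => d.insert w (d.getD w 0 + 1)) (PySem.Dict.empty : PySem.Dict String Int)
  let repeated_words := (word_count.items.filter (fun p => decide (p.2 > threshold))).map Prod.fst
  decide ((repeated_words.length : Int) > threshold)

-- ===== PORT B =====
-- run scan over the sorted word list: each step consumes one maximal run of equal words
def pvRunTally (threshold : Int) : List String → Int
  | [] => 0
  | x :: xs =>
    let rest := xs.dropWhile (fun w => w == x)
    (if ((xs.takeWhile (fun w => w == x)).length + 1 : Int) > threshold then 1 else 0)
      + pvRunTally threshold rest
  termination_by l => l.length
  decreasing_by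
    simp only [List.length_cons]
    exact Nat.lt_succ_of_le (List.length_dropWhile_le _ _)

def detect_repeated_text_alt (text : String) (threshold : Int) : Bool :=
  let words := PySem.List.sorted (PySem.Str.split₀ text) (fun w => w) false
  decide (pvRunTally threshold words > threshold)

-- ===== PRECONDITION & SPEC =====
def Spec_detect_repeated_text (text : String) (threshold : Int) (out : Bool) : Prop := out = detect_repeated_text_alt text threshold
instance (text : String) (threshold : Int) (out : Bool) : Decidable (Spec_detect_repeated_text text threshold out) := by unfold Spec_detect_repeated_text; infer_instance

-- ===== CLAIM (what is proved, stated in full; the proofs are below) =====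
def Claim_equal_detect_repeated_text : Prop := ∀ (text : String) (threshold : Int), Dom_detect_repeated_text text threshold → Spec_detect_repeated_text text threshold (detect_repeated_text text threshold)

-- ===== LEMMAS AND PROOFS =====

-- the common value: number of distinct words of l whose multiplicity exceeds t
def pvTally (t : Int) (l : List String) : Nat :=
  (PySem.Set.ofList l).countP (fun k => decide ((l.count k : Int) > t))

theorem pvA_eq (text : String) (t : Int) :
    detect_repeated_text text t = decide ((pvTally t (PySem.Str.split₀ text) : Int) > t) := by
  unfold detect_repeated_text pvTally
  simp only [PySem.Dict.foldl_insert_getD_add_one_eq_counter, PySem.Dict.items_counter,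
    List.filter_map, List.length_map, List.countP_eq_length_filter, Function.comp_def]

theorem pvTally_perm (t : Int) (l l' : List String) (h : l.Perm l') :
    pvTally t l = pvTally t l' := by
  unfold pvTally
  have hperm : (PySem.Set.ofList l).Perm (PySem.Set.ofList l') := by
    rw [List.perm_ext_iff_of_nodup (PySem.Set.nodup_ofList l) (PySem.Set.nodup_ofList l')]
    intro a
    rw [PySem.Set.mem_ofList, PySem.Set.mem_ofList]
    exact h.mem_iff
  rw [hperm.countP_eq]
  refine List.countP_congr ?_
  intro k _
  simp [h.count_eq]

theorem pvRunTally_eq (t : Int) : ∀ (l : List String), l.Pairwise (· ≤ ·) →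
    pvRunTally t l = (pvTally t l : Int)
  | [], _ => by simp [pvRunTally, pvTally, PySem.Set.ofList, PySem.Set.empty]
  | x :: xs, hpair => by
    set run := xs.takeWhile (fun w => w == x) with hrun_def
    set rest := xs.dropWhile (fun w => w == x) with hrest_def
    have hxs : run ++ rest = xs := List.takeWhile_append_dropWhile
    have hrun_all : ∀ w ∈ run, w = x := by
      intro w hw
      have := List.mem_takeWhile_imp hw
      simpa using this
    have hrest_sub : rest.Sublist (x :: xs) := by
      refine List.Sublist.trans (List.dropWhile_sublist _) (List.sublist_cons_self x xs)
    have hx_le : ∀ w ∈ xs, x ≤ w := by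
      intro w hw; exact (List.pairwise_cons.mp hpair).1 w hw
    have hrest_ne : ∀ w ∈ rest, w ≠ x := by
      intro w hw
      cases hrest : rest with
      | nil => rw [hrest] at hw; cases hw
      | cons y ys =>
        have hrest' : xs.dropWhile (fun w => w == x) = y :: ys := by rw [← hrest_def, hrest]
        have hne : rest ≠ [] := by rw [hrest]; simp
        have hy : ¬ (y == x) = true := by
          have := List.head_dropWhile_not (fun w => w == x) (l := xs) (by rw [hrest']; simp)
          simpa [hrest'] using this
        have hyne : y ≠ x := by simpa using hy
        have hymem : y ∈ xs := by
          have : y ∈ rest := by rw [hrest]; exact List.mem_cons_self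
          exact (List.Sublist.trans (List.dropWhile_sublist _) (List.Sublist.refl xs)).mem (by rw [← hrest_def] at *; exact this)
        have hxy : x < y := lt_of_le_of_ne (hx_le y hymem) (Ne.symm hyne)
        rw [hrest] at hw
        rcases List.mem_cons.mp hw with h | h
        · subst h; exact hyne
        · have hpw_rest : List.Pairwise (fun a b => a ≤ b) rest := List.Pairwise.sublist hrest_sub hpair
          have : y ≤ w := by
            rw [hrest] at hpw_rest
            exact (List.pairwise_cons.mp hpw_rest).1 w h
          exact fun hwx => absurd (hwx ▸ this) (not_le.mpr hxy)
    have hsplit : x :: xs = (x :: run) ++ rest := by simp [← hxs]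
    have hcount_x : (x :: xs).count x = run.length + 1 := by
      rw [hsplit, List.count_append]
      have h1 : (x :: run).count x = run.length + 1 := by
        have : (x :: run).count x = (x :: run).length := by
          rw [List.count_eq_length]
          intro b hb
          rcases List.mem_cons.mp hb with h | h
          · exact h.symm
          · exact (hrun_all b h).symm
        simpa using this
      have h2 : rest.count x = 0 := List.count_eq_zero.mpr (fun h => hrest_ne x h rfl)
      omega
    have hcount_k : ∀ k, k ≠ x → (x :: xs).count k = rest.count k := by
      intro k hk
      rw [hsplit, List.count_append]
      have : (x :: run).count k = 0 := by
        rw [List.count_eq_zero]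
        intro hmem
        rcases List.mem_cons.mp hmem with h | h
        · exact hk h
        · exact hk (hrun_all k h)
      omega
    have hofperm : (PySem.Set.ofList (x :: xs)).Perm (x :: PySem.Set.ofList rest) := by
      rw [List.perm_ext_iff_of_nodup (PySem.Set.nodup_ofList _)]
      · intro a
        simp only [PySem.Set.mem_ofList, List.mem_cons]
        constructor
        · rintro (h | h)
          · exact Or.inl h
          · rw [← hxs] at h
            rcases List.mem_append.mp h with h | h
            · exact Or.inl (hrun_all a h)
            · exact Or.inr h
        · rintro (h | h)
          · exact Or.inl h
          · refine Or.inr ?_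
            rw [← hxs]
            exact List.mem_append.mpr (Or.inr h)
      · refine List.nodup_cons.mpr ⟨?_, PySem.Set.nodup_ofList _⟩
        rw [PySem.Set.mem_ofList]
        intro h; exact hrest_ne x h rfl
    have hrest_pair : List.Pairwise (fun a b => a ≤ b) rest := List.Pairwise.sublist hrest_sub hpair
    have hrest_lt : rest.length < (x :: xs).length := by
      simp only [List.length_cons]
      exact Nat.lt_succ_of_le (hrest_def ▸ List.length_dropWhile_le _ _)
    have ih := pvRunTally_eq t rest hrest_pair
    have htally : pvTally t (x :: xs)
        = (if ((run.length : Int) + 1 > t) then 1 else 0) + pvTally t rest := by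
      unfold pvTally
      rw [hofperm.countP_eq, List.countP_cons]
      have hpx : (decide (((x :: xs).count x : Int) > t))
          = decide ((run.length : Int) + 1 > t) := by
        rw [hcount_x]; push_cast; ring_nf
      have hrestP : List.countP (fun k => decide (((x :: xs).count k : Int) > t)) (PySem.Set.ofList rest)
          = List.countP (fun k => decide ((rest.count k : Int) > t)) (PySem.Set.ofList rest) := by
        refine List.countP_congr ?_
        intro k hk
        rw [PySem.Set.mem_ofList] at hk
        rw [hcount_k k (hrest_ne k hk)]
      rw [hrestP, hpx]
      by_cases h : (run.length : Int) + 1 > t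
      · simp [h]; omega
      · simp [h]
    rw [htally]
    simp only [pvRunTally, ← hrun_def, ← hrest_def]
    rw [ih]
    push_cast
    by_cases h : (run.length : Int) + 1 > t
    · simp [h, add_comm]
    · simp [h]
termination_by l => l.length
decreasing_by simpa using hrest_lt

theorem detect_repeated_text_spec : Claim_equal_detect_repeated_text := by
  intro text threshold _
  unfold Spec_detect_repeated_text detect_repeated_text_alt
  rw [pvA_eq]
  set words := PySem.Str.split₀ text with hw
  have hpair : (PySem.List.sorted words (fun w => w) false).Pairwise (· ≤ ·) := by
    have := PySem.List.sorted_pairwise words (fun w => w)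
    simpa using this
  show _ = decide (pvRunTally threshold (PySem.List.sorted words (fun w => w) false) > threshold)
  rw [pvRunTally_eq threshold _ hpair,
    pvTally_perm threshold _ words (PySem.List.sorted_perm words (fun w => w) false)]
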